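-- pv_equiv track=rewrite | github.com/omegaphoenix/SonnetGenerator | bigramizer.py | countBigrams
-- ===== SOURCE A (Python) =====
-- def countBigrams(words):
--     bigram = {}
--     prevWord = "\n"
--     for word in words:
--         if word != "\n":
--             if prevWord != "\n":
--                 twoWords = prevWord + " " + word
--                 if twoWords in bigram:
--                     bigram[twoWords] += 1
--                 else:
--                     bigram[twoWords] = 1
--             prevWord = word
--     freq_bigram = []
--     for word in bigram:
--         if bigram[word] > 2:
--             freq_bigram.append(word.split(" "))
--     return freq_bigram
-- ===== SOURCE B (Python) =====
-- def countBigrams(words):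
--     # Brute-force scan strategy: build the bigram key list once, then walk it;
--     # a key is emitted at its first occurrence (tracked with a set of already
--     # seen keys) when scanning the whole key list counts it more than twice.
--     # No counting dict: frequencies come from keys.count.
--     tokens = [w for w in words if w != "\n"]
--     keys = [a + " " + b for a, b in zip(tokens, tokens[1:])]
--     out = []
--     seen = set()
--     for k in keys:
--         if k not in seen and keys.count(k) > 2:
--             out.append(k.split(" "))
--         seen.add(k)
--     return out
-- ===== Notes on version B (the rewrite author's own statement) =====
-- stated objective: alternative
-- what changed: Drops A's hash-map frequency counting: B stages the computation (filter tokens, materialise the bigram-key list, then one scan that emits a key at its first occurrence - tracked with a seen-set - when keys.count(k) > 2), i.e. frequencies come from whole-list scans instead of dict increments; trades A's O(n) for an O(n^2) staged formulation.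
import Mathlib
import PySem

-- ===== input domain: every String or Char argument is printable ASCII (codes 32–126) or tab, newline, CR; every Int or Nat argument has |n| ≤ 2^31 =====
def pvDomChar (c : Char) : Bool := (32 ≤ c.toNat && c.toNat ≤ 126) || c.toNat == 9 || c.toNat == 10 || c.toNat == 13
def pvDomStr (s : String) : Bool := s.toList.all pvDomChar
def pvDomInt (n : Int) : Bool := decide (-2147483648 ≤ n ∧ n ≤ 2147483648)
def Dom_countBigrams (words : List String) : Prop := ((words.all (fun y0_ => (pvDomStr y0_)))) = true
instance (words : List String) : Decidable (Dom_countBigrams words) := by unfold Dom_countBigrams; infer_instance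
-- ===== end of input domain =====

-- B drops A's dict counting: it stages token filtering, a bigram-key list, and a scan
-- emitting each key at its first occurrence (seen-set) when the whole key list counts it > 2
-- (alternative decomposition, not faster).

-- w.split(" "): exact since the separator " " is nonempty (split? is none only for sep = "")
def pvSplitSpace (w : String) : List String := (PySem.Str.split? w " ").getD []

-- ===== PORT A =====
def countBigrams (words : List String) : List (List String) :=
  let st := words.foldl
    (fun (st : PySem.Dict String Int × String) word =>
      if word != "\n" then
        let d :=
          if st.2 != "\n" then
            let twoWords := st.2 ++ " " ++ word
            if st.1.contains twoWords then st.1.insert twoWords (st.1.getD twoWords 0 + 1)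
            else st.1.insert twoWords 1
          else st.1
        (d, word)
      else st)
    (PySem.Dict.empty, "\n")
  let bigram := st.1
  bigram.keys.foldl
    (fun acc word => if bigram.getD word 0 > 2 then acc ++ [pvSplitSpace word] else acc) []

-- ===== PORT B =====
def countBigrams_alt (words : List String) : List (List String) :=
  let tokens := words.filter (fun w => w != "\n")
  let keys := (tokens.zip (PySem.List.slice tokens (some 1))).map (fun p => p.1 ++ " " ++ p.2)
  (keys.foldl
    (fun (st : List (List String) × PySem.Set String) k =>
      (if !(PySem.Set.contains st.2 k) && decide (PySem.List.count keys k > 2) then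
        st.1 ++ [pvSplitSpace k]
       else st.1,
       PySem.Set.add st.2 k))
    ([], PySem.Set.empty)).1

-- ===== PRECONDITION & SPEC =====
def Spec_countBigrams (words : List String) (out : List (List String)) : Prop := out = countBigrams_alt words
instance (words : List String) (out : List (List String)) : Decidable (Spec_countBigrams words out) := by unfold Spec_countBigrams; infer_instance

-- ===== CLAIM (what is proved, stated in full; the proofs are below) =====
def Claim_equal_countBigrams : Prop := ∀ (words : List String), Dom_countBigrams words → Spec_countBigrams words (countBigrams words)

-- ===== LEMMAS AND PROOFS =====

-- A's counting step on a single bigram key, and the full A loop body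
def pvStepA (d : PySem.Dict String Int) (k : String) : PySem.Dict String Int :=
  if d.contains k then d.insert k (d.getD k 0 + 1) else d.insert k 1

theorem pvStepA_eq_insert (d : PySem.Dict String Int) (k : String) :
    pvStepA d k = d.insert k (d.getD k 0 + 1) := by
  unfold pvStepA
  by_cases h : d.contains k = true
  · simp [h]
  · simp [h, PySem.Dict.getD_of_not_contains d 0 (by simpa using h)]

def pvLoopA (st : PySem.Dict String Int × String) (word : String) : PySem.Dict String Int × String :=
  if word != "\n" then
    (if st.2 != "\n" then pvStepA st.1 (st.2 ++ " " ++ word) else st.1, word)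
  else st

-- the key sequence formed from previous word p and the filtered tail
def pvKeys (p : String) (f : List String) : List String :=
  ((p :: f).zip f).map (fun pw => pw.1 ++ " " ++ pw.2)

theorem pvFilter_nl (w : String) (ws : List String) (hw : w = "\n") :
    List.filter (fun w => w != "\n") (w :: ws) = List.filter (fun w => w != "\n") ws := by
  simp [hw]

theorem pvFilter_pos (w : String) (ws : List String) (hw : (w != "\n") = true) :
    List.filter (fun w => w != "\n") (w :: ws) = w :: List.filter (fun w => w != "\n") ws := by
  simp [hw]

theorem pvLoopA_main (words : List String) (d : PySem.Dict String Int) (p : String)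
    (hp : p ≠ "\n") :
    words.foldl pvLoopA (d, p) =
      ((pvKeys p (words.filter (fun w => w != "\n"))).foldl
          (fun d k => d.insert k (d.getD k 0 + 1)) d,
        ((words.filter (fun w => w != "\n")).getLast? ).getD p) := by
  induction words generalizing d p with
  | nil => simp [pvKeys]
  | cons w ws ih =>
    by_cases hw : w = "\n"
    · rw [List.foldl_cons, show pvLoopA (d, p) w = (d, p) from by simp [pvLoopA, hw],
        pvFilter_nl w ws hw]
      exact ih d p hp
    · have hw' : (w != "\n") = true := by simpa using hw
      have hp' : (p != "\n") = true := by simpa using hp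
      rw [List.foldl_cons,
        show pvLoopA (d, p) w = (pvStepA d (p ++ " " ++ w), w) from by simp [pvLoopA, hw', hp'],
        pvFilter_pos w ws hw', ih (pvStepA d (p ++ " " ++ w)) w hw, pvStepA_eq_insert]
      rcases hrest : List.filter (fun w => w != "\n") ws with _ | ⟨a, t⟩
      · simp [pvKeys]
      · cases h2 : (a :: t).getLast? with
        | none => simp [List.getLast?_eq_none_iff] at h2
        | some b => simp [pvKeys, h2]

theorem pvLoopA_start (words : List String) (d : PySem.Dict String Int) :
    (words.foldl pvLoopA (d, "\n")).1 =
      (((words.filter (fun w => w != "\n")).zip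
          (PySem.List.slice (words.filter (fun w => w != "\n")) (some 1))).map
        (fun pw => pw.1 ++ " " ++ pw.2)).foldl (fun d k => d.insert k (d.getD k 0 + 1)) d := by
  induction words generalizing d with
  | nil => simp
  | cons w ws ih =>
    by_cases hw : w = "\n"
    · rw [List.foldl_cons, show pvLoopA (d, "\n") w = (d, "\n") from by simp [pvLoopA, hw],
        pvFilter_nl w ws hw]
      exact ih d
    · have hw' : (w != "\n") = true := by simpa using hw
      rw [List.foldl_cons,
        show pvLoopA (d, "\n") w = (d, w) from by simp [pvLoopA, hw'],
        pvFilter_pos w ws hw', pvLoopA_main ws d w hw,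
        PySem.List.slice_from _ (by norm_num)]
      simp [pvKeys]

-- A's extraction loop over the counter dict of ks
theorem pvExtractA (ks : List String) :
    (PySem.Dict.counter ks).keys.foldl
      (fun acc word => if (PySem.Dict.counter ks).getD word 0 > 2 then acc ++ [pvSplitSpace word]
        else acc) [] =
    ((PySem.Set.ofList ks).filter (fun k => decide (PySem.List.count ks k > 2))).map
      pvSplitSpace := by
  rw [PySem.List.foldl_append_ite (fun word => (PySem.Dict.counter ks).getD word 0 > 2)
      pvSplitSpace, PySem.Dict.keys_counter, List.nil_append]
  refine congrArg (List.map pvSplitSpace) (List.filter_congr fun x _ => ?_)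
  rw [PySem.Dict.getD_counter, PySem.List.count_eq, decide_eq_decide]
  omega

-- B's scanning loop emits exactly the first occurrences passing P
theorem pvFoldEmit (P : String → Bool) (ks : List String) :
    ∀ (out : List (List String)) (seen : PySem.Set String),
    (ks.foldl
      (fun (st : List (List String) × PySem.Set String) k =>
        (if !(PySem.Set.contains st.2 k) && P k then st.1 ++ [pvSplitSpace k] else st.1,
         PySem.Set.add st.2 k))
      (out, seen)).1
    = out ++ ((PySem.Set.ofList ks).filter
        (fun k => !(PySem.Set.contains seen k) && P k)).map pvSplitSpace := by
  induction ks with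
  | nil => intro out seen; simp
  | cons k t ih =>
    intro out seen
    rw [List.foldl_cons, ih, PySem.Set.ofList_cons]
    have hQ' : (fun x => !(PySem.Set.contains (PySem.Set.add seen k) x) && P x)
        = fun x => (!(PySem.Set.contains seen x) && P x) && !(x == k) := by
      funext x
      by_cases hx : x = k
      · subst hx; simp [PySem.Set.mem_add]
      · simp [PySem.Set.mem_add, hx]
    have hff : List.filter (fun x => (!(PySem.Set.contains seen x) && P x) && !(x == k))
          (PySem.Set.ofList t)
        = List.filter (fun x => !(PySem.Set.contains seen x) && P x)
            ((PySem.Set.ofList t).discard k) := by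
      rw [show (PySem.Set.ofList t).discard k
            = List.filter (fun y => !(y == k)) (PySem.Set.ofList t) from rfl,
        List.filter_filter]
    rw [hQ', hff, List.filter_cons]
    cases hQk : (!(PySem.Set.contains seen k) && P k) with
    | false => simp
    | true => simp

-- ===== VERDICT (by name: the statement is the Claim_ definition above) =====
theorem countBigrams_spec : Claim_equal_countBigrams := by
  intro words _
  unfold Spec_countBigrams countBigrams countBigrams_alt
  have hA : (words.foldl
      (fun (st : PySem.Dict String Int × String) word =>
        if word != "\n" then
          (if st.2 != "\n" then
            (if st.1.contains (st.2 ++ " " ++ word) then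
              st.1.insert (st.2 ++ " " ++ word) (st.1.getD (st.2 ++ " " ++ word) 0 + 1)
            else st.1.insert (st.2 ++ " " ++ word) 1)
          else st.1, word)
        else st) (PySem.Dict.empty, "\n")) = words.foldl pvLoopA (PySem.Dict.empty, "\n") := rfl
  simp only [hA]
  rw [pvLoopA_start words PySem.Dict.empty]
  set keys := ((words.filter (fun w => w != "\n")).zip
      (PySem.List.slice (words.filter (fun w => w != "\n")) (some 1))).map
    (fun pw => pw.1 ++ " " ++ pw.2) with hkeys
  rw [PySem.Dict.foldl_insert_getD_add_one_eq_counter keys, pvExtractA keys,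
    pvFoldEmit (fun k => decide (PySem.List.count keys k > 2)) keys [] PySem.Set.empty]
  simp
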